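-- pv_equiv track=rewrite | github.com/altheaden/polaris | polaris/job/__init__.py | clean_up_whitespace
-- ===== SOURCE A (Python) =====
-- def clean_up_whitespace(text):
--     """
--     Clean up whitespace after jinja templating
--
--     Parameters
--     ----------
--     text : str
--         Text to clean up
--
--     Returns
--     -------
--     text : str
--         Text with extra blank lines removed
--     """
--     prev_line = None
--     lines = text.split('\n')
--     trimmed = list()
--     # remove extra blank lines
--     for line in lines:
--         if line != '' or prev_line != '':
--             trimmed.append(line)
--             prev_line = line
--
--     line = ''
--     lines = list()
--     # remove blank lines between comments
--     for next_line in trimmed: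
--         if line != '' or not next_line.startswith('#'):
--             lines.append(line)
--         line = next_line
--
--     # add the last line that we missed and an extra blank line
--     lines.extend([trimmed[-1], ''])
--     text = '\n'.join(lines)
--     return text
-- ===== SOURCE B (Python) =====
-- def clean_up_whitespace(text):
--     """Single pass over the split lines: carry the last kept line (to collapse
--     blank runs) and a one-step-delayed pending line (for the blank-before-comment
--     rule), instead of two sequential loops over intermediate lists."""
--     out = []
--     pending = ''
--     last_kept = None
--     for line in text.split('\n'):
--         if line == '' and last_kept == '':
--             continue
--         if pending != '' or not line.startswith('#'):
--             out.append(pending)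
--         pending = line
--         last_kept = line
--     out.append(pending)
--     out.append('')
--     return '\n'.join(out)
-- ===== Notes on version B (the rewrite author's own statement) =====
-- stated objective: alternative
-- what changed: Fuses A's two sequential loops (blank-run collapse over the split lines, then the delayed blank-before-comment pass over the intermediate 'trimmed' list) into one single pass carrying the last kept line and a one-step-delayed pending line, building no intermediate list.
import Mathlib
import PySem

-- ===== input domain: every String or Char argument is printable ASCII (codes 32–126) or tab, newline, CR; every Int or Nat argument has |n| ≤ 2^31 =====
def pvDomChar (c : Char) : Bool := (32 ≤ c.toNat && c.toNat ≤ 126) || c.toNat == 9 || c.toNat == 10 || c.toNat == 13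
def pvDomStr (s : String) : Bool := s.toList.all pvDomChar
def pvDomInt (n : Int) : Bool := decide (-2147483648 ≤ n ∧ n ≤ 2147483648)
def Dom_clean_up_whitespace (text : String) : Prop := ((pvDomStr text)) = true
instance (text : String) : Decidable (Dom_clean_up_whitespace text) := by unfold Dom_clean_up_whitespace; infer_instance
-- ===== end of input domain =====

-- B fuses A's two passes (blank-run collapse, then delayed blank-before-comment pass)
-- into one pass with no intermediate list (alternative decomposition, same O(n) cost).

-- ===== PORT A =====
-- first loop of A: keep line unless line == '' and prev_line == '' (prev_line starts as None)
def pvTrim (prev : Option String) (ls : List String) : List String :=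
  match ls with
  | [] => []
  | l :: rest =>
    if l ≠ "" ∨ prev ≠ some "" then l :: pvTrim (some l) rest else pvTrim prev rest

-- second loop of A: delayed append; returns (lines, final value of the carried `line`)
def pvComments (line : String) (ts : List String) : List String × String :=
  match ts with
  | [] => ([], line)
  | t :: rest =>
    let r := pvComments t rest
    (if line ≠ "" ∨ ¬ (PySem.Str.startswith t "#" = true) then line :: r.1 else r.1, r.2)

def clean_up_whitespace (text : String) : String :=
  -- s.split('\n'): split? is none only for sep = "", never here
  let lines := (PySem.Str.split? text "\n").getD []
  let trimmed := pvTrim none lines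
  let r := pvComments "" trimmed
  -- trimmed[-1]: split returns at least one piece and the first loop always keeps the
  -- first line, so trimmed is nonempty and the default of pyGetD is never used
  PySem.Str.join "\n" (r.1 ++ [PySem.List.pyGetD trimmed (-1) "", ""])

-- ===== PORT B =====
-- single pass: `pending` is the one-step-delayed output line, `lastKept` the last kept line
def pvFused (pending : String) (lastKept : Option String) (ls : List String) : List String × String :=
  match ls with
  | [] => ([], pending)
  | l :: rest =>
    if l = "" ∧ lastKept = some "" then pvFused pending lastKept rest
    else
      let r := pvFused l (some l) rest
      (if pending ≠ "" ∨ ¬ (PySem.Str.startswith l "#" = true) then pending :: r.1 else r.1, r.2)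

def clean_up_whitespace_alt (text : String) : String :=
  -- s.split('\n'): split? is none only for sep = "", never here
  let r := pvFused "" none ((PySem.Str.split? text "\n").getD [])
  PySem.Str.join "\n" (r.1 ++ [r.2, ""])

-- ===== PRECONDITION & SPEC =====
def Spec_clean_up_whitespace (text : String) (out : String) : Prop := out = clean_up_whitespace_alt text
instance (text : String) (out : String) : Decidable (Spec_clean_up_whitespace text out) := by unfold Spec_clean_up_whitespace; infer_instance

-- ===== CLAIM (what is proved, stated in full; the proofs are below) =====
def Claim_equal_clean_up_whitespace : Prop := ∀ (text : String), Dom_clean_up_whitespace text → Spec_clean_up_whitespace text (clean_up_whitespace text)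

-- ===== LEMMAS AND PROOFS =====

-- fusion: B's single pass equals A's second pass applied to the output of A's first pass
theorem pvFused_eq (ls : List String) : ∀ (pending : String) (prev : Option String),
    pvFused pending prev ls = pvComments pending (pvTrim prev ls) := by
  induction ls with
  | nil => intro pending prev; rfl
  | cons l rest ih =>
    intro pending prev
    by_cases h : l = "" ∧ prev = some ""
    · rcases h with ⟨h1, h2⟩
      simp [pvFused, pvTrim, h1, h2, ih]
    · have hpos : l ≠ "" ∨ prev ≠ some "" := by tauto
      simp [pvFused, pvTrim, h, hpos, pvComments, ih]

-- the carried `line` at the end of A's second pass is the last element of trimmed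
theorem pvComments_snd (ts : List String) : ∀ (line : String),
    (pvComments line ts).2 = ts.getLastD line := by
  induction ts with
  | nil => intro line; rfl
  | cons t rest ih =>
    intro line
    have h2 : (pvComments line (t :: rest)).2 = (pvComments t rest).2 := rfl
    rw [h2, ih]
    cases rest with
    | nil => rfl
    | cons h l =>
      obtain ⟨x, hx⟩ := Option.isSome_iff_exists.mp (List.getLast?_isSome.mpr (List.cons_ne_nil h l))
      simp [List.getLastD_eq_getLast?, hx]

theorem pyGetD_neg_one_eq_getLastD (ts : List String) :
    PySem.List.pyGetD ts (-1) "" = ts.getLastD "" := by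
  cases hts : ts with
  | nil => decide
  | cons t rest =>
    rw [PySem.List.pyGetD_neg_ofNat (t :: rest) 1 "" (by omega) (by simp)]
    simp [List.getLastD_eq_getLast?, List.getLast?_eq_getElem?]
    rfl

-- ===== VERDICT (by name: the statement is the Claim_ definition above) =====
theorem clean_up_whitespace_spec : Claim_equal_clean_up_whitespace := by
  intro text _
  unfold Spec_clean_up_whitespace clean_up_whitespace clean_up_whitespace_alt
  simp only [pvFused_eq, pvComments_snd, pyGetD_neg_one_eq_getLastD]
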